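-- pv_equiv track=rewrite | github.com/themarceloribeiro/takeoff-py | takeoff/tests/generators/web/web_project_generator_test.py | line_block
-- ===== SOURCE A (Python) =====
-- def line_block(starting_line, finishing_line, lines):
--     block = []
--     started = False
--     for line in lines:
--         if line == starting_line:
--             started = True
--         if started:
--             block.append(line)
--             if line == finishing_line:
--                 started = False
--
--     return block
-- ===== SOURCE B (Python) =====
-- def line_block(starting_line, finishing_line, lines):
--     block = []
--     i = 0
--     n = len(lines)
--     while i < n:
--         if lines[i] == starting_line:
--             # consume one whole block (both markers inclusive) in an inner scan
--             while i < n: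
--                 block.append(lines[i])
--                 if lines[i] == finishing_line:
--                     break
--                 i += 1
--         i += 1
--     return block
-- ===== Notes on version B (the rewrite author's own statement) =====
-- stated objective: alternative
-- what changed: Replaced the boolean-flag state machine with an index-driven outer scan that, on meeting the start marker, consumes the whole block (inclusive of both markers) in an inner loop and resumes the outer scan past the finish position.
import Mathlib
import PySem

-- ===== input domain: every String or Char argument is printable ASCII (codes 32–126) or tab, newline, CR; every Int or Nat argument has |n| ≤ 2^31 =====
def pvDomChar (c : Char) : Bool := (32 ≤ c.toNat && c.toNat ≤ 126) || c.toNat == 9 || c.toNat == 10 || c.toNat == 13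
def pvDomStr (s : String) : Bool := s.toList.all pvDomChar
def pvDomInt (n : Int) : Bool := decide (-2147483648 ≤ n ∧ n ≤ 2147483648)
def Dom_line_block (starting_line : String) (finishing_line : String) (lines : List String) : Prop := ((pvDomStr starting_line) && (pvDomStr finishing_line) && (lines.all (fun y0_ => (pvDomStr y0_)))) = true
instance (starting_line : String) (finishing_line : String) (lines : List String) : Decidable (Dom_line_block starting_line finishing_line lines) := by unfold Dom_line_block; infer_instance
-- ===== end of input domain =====

-- B replaces A's boolean-flag state machine by an index-driven scan that consumes
-- each delimited block in a nested inner pass (objective: alternative decomposition).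

-- ===== PORT A =====
-- A: single pass with a 'started' flag; state = (block, started); loop body:
def stepA (starting_line finishing_line : String) (st : List String × Bool) (line : String) : List String × Bool :=
  let started := if line = starting_line then true else st.2
  if started then
    (st.1 ++ [line], if line = finishing_line then false else true)
  else
    (st.1, started)

def line_block (starting_line : String) (finishing_line : String) (lines : List String) : List String :=
  (lines.foldl (stepA starting_line finishing_line) ([], false)).1

-- ===== PORT B =====
-- inner while loop of Source B: append lines until (and including) the finish marker;
-- returns (the collected segment, the lines after the position where it stopped)
def pvInner (finishing_line : String) : List String → List String × List String
  | [] => ([], [])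
  | l :: rest =>
      if l = finishing_line then ([l], rest)
      else
        let p := pvInner finishing_line rest
        (l :: p.1, p.2)

theorem pvInner_snd_length (finishing_line : String) :
    ∀ xs : List String, (pvInner finishing_line xs).2.length ≤ xs.length := by
  intro xs
  induction xs with
  | nil => simp [pvInner]
  | cons l rest ih =>
      by_cases h : l = finishing_line <;> simp [pvInner, h] <;> omega

theorem pvInner_snd_length_cons (finishing_line l : String) (rest : List String) :
    (pvInner finishing_line (l :: rest)).2.length ≤ rest.length := by
  by_cases h : l = finishing_line
  · simp [pvInner, h]
  · have := pvInner_snd_length finishing_line rest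
    simp [pvInner, h]
    omega

-- outer while loop of Source B: scan for the start marker, consume a block, resume after it
def pvOuter (starting_line finishing_line : String) (xs : List String) : List String :=
  match xs with
  | [] => []
  | l :: rest =>
      if l = starting_line then
        let p := pvInner finishing_line (l :: rest)
        p.1 ++ pvOuter starting_line finishing_line p.2
      else
        pvOuter starting_line finishing_line rest
termination_by xs.length
decreasing_by
  · have := pvInner_snd_length_cons finishing_line l rest
    simp only [List.length_cons]
    omega
  · simp

def line_block_alt (starting_line : String) (finishing_line : String) (lines : List String) : List String :=
  pvOuter starting_line finishing_line lines

-- ===== PRECONDITION & SPEC =====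
def Spec_line_block (starting_line : String) (finishing_line : String) (lines : List String) (out : List String) : Prop := out = line_block_alt starting_line finishing_line lines
instance (starting_line : String) (finishing_line : String) (lines : List String) (out : List String) : Decidable (Spec_line_block starting_line finishing_line lines out) := by unfold Spec_line_block; infer_instance

-- ===== CLAIM (what is proved, stated in full; the proofs are below) =====
def Claim_equal_line_block : Prop := ∀ (starting_line : String) (finishing_line : String) (lines : List String), Dom_line_block starting_line finishing_line lines → Spec_line_block starting_line finishing_line lines (line_block starting_line finishing_line lines)

-- ===== LEMMAS AND PROOFS =====

-- reference recursion: what the flag machine computes from flag b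
def Rspec (s f : String) : Bool → List String → List String
  | _, [] => []
  | b, l :: rest =>
      if l = s ∨ b = true then
        l :: Rspec s f (if l = f then false else true) rest
      else
        Rspec s f false rest

theorem foldA_eq_Rspec (s f : String) :
    ∀ (xs : List String) (acc : List String) (b : Bool),
      (xs.foldl (stepA s f) (acc, b)).1 = acc ++ Rspec s f b xs := by
  intro xs
  induction xs with
  | nil => intro acc b; simp [Rspec]
  | cons l rest ih =>
      intro acc b
      rw [List.foldl_cons]
      by_cases hst : l = s ∨ b = true
      · have hstep : stepA s f (acc, b) l = (acc ++ [l], if l = f then false else true) := by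
          rcases hst with h | h
          · simp [stepA, h]
          · by_cases hs : l = s <;> simp [stepA, hs, h]
        rw [hstep, ih]
        simp [Rspec, hst]
      · push_neg at hst
        have hstep : stepA s f (acc, b) l = (acc, b) := by
          simp [stepA, hst.1, hst.2]
        rw [hstep, ih]
        have hb : b = false := by
          cases b
          · rfl
          · exact absurd rfl hst.2
        subst hb
        simp [Rspec, hst.1]

theorem Rspec_true_eq_inner (s f : String) :
    ∀ xs : List String,
      Rspec s f true xs =
        (pvInner f xs).1 ++ Rspec s f false (pvInner f xs).2 := by
  intro xs
  induction xs with
  | nil => simp [Rspec, pvInner]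
  | cons l rest ih =>
      by_cases hf : l = f <;> simp [Rspec, pvInner, hf, ih]

theorem pvOuter_eq_Rspec (s f : String) :
    ∀ (n : Nat) (xs : List String), xs.length ≤ n → pvOuter s f xs = Rspec s f false xs := by
  intro n
  induction n with
  | zero =>
      intro xs h
      have : xs = [] := List.length_eq_zero_iff.mp (Nat.le_zero.mp h)
      subst this
      rw [pvOuter]
      simp [Rspec]
  | succ n ih =>
      intro xs h
      match xs with
      | [] => rw [pvOuter]; simp [Rspec]
      | l :: rest =>
          rw [pvOuter]
          by_cases hs : l = s
          · simp only [if_pos hs]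
            have hlen : (pvInner f (l :: rest)).2.length ≤ n := by
              have := pvInner_snd_length_cons f l rest
              simp at h
              omega
            rw [ih _ hlen]
            have h1 : Rspec s f false (l :: rest) = Rspec s f true (l :: rest) := by
              simp [Rspec, hs]
            rw [h1, Rspec_true_eq_inner]
          · simp only [if_neg hs]
            have hlen : rest.length ≤ n := by simp at h; omega
            rw [ih _ hlen]
            simp [Rspec, hs]

-- ===== VERDICT (by name: the statement is the Claim_ definition above) =====
theorem line_block_spec : Claim_equal_line_block := by
  intro s f lines _
  show line_block s f lines = line_block_alt s f lines
  rw [line_block, line_block_alt, foldA_eq_Rspec, pvOuter_eq_Rspec s f lines.length lines le_rfl]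
  simp
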